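-- pv_equiv track=rewrite | github.com/jamesczq/coding-exercise | programs/delete_duplicates.py | get_unique_indices
-- ===== SOURCE A (Python) =====
-- from typing import List
--
-- def get_unique_indices(arr: List[int]) -> List[int]:
--     """Return indices of unique, non-duplicate, elements of a sorted list."""
--     list_out = [0]
--     non_dup_index = 1
--     for i in range(1, len(arr)):
--         if arr[non_dup_index - 1] != arr[i]:
--             list_out.append(i)
--             non_dup_index += 1
--         else:
--             non_dup_index = i + 1
--     return list_out
-- ===== SOURCE B (Python) =====
-- from typing import List
--
-- def get_unique_indices(arr: List[int]) -> List[int]: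
--     """Return indices of unique, non-duplicate, elements of a sorted list."""
--     def bounds(lo: int, hi: int) -> List[int]:
--         # indices i with lo < i < hi and arr[i] != arr[i-1], by divide and conquer
--         if hi - lo <= 1:
--             return []
--         mid = (lo + hi) // 2
--         here = [mid] if arr[mid] != arr[mid - 1] else []
--         return bounds(lo, mid) + here + bounds(mid, hi)
--     return [0] + bounds(0, len(arr))
-- ===== Notes on version B (the rewrite author's own statement) =====
-- stated objective: alternative
-- what changed: B replaces A's forward index loop with its 'non_dup_index' state variable by a divide-and-conquer recursion bounds(lo, hi) that splits the index range at its midpoint and concatenates the boundary indices of the two halves around a single midpoint test.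
import Mathlib
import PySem

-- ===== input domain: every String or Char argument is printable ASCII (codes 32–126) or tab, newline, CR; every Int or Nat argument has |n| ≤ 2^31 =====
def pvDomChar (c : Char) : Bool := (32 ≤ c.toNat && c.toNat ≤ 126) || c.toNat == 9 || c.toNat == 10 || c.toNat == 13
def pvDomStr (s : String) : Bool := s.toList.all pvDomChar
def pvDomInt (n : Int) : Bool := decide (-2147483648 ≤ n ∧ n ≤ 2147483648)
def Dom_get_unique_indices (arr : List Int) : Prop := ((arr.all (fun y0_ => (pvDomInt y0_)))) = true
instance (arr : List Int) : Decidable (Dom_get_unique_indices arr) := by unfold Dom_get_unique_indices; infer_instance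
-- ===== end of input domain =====

-- B replaces A's forward index loop (with its 'non_dup_index' state) by a divide-and-conquer recursion collecting boundary indices; alternative decomposition, same asymptotic cost.


-- ===== PORT A =====
-- arr[non_dup_index-1] and arr[i] are always in range (non_dup_index = i throughout), so pyGetD's default is never read
def get_unique_indices (arr : List Int) : List Int :=
  ((PySem.List.pyRange 1 (arr.length : Int) 1).foldl
    (fun (st : List Int × Int) i =>
      if PySem.List.pyGetD arr (st.2 - 1) 0 ≠ PySem.List.pyGetD arr i 0 then
        (st.1 ++ [i], st.2 + 1)
      else
        (st.1, i + 1))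
    ([0], 1)).1

-- ===== PORT B =====
-- bounds(lo, hi): indices i with lo < i < hi and arr[i] != arr[i-1], by divide and conquer.
-- Python's (lo+hi)//2 is Nat division here: lo, hi are the nonnegative recursion bounds, where // agrees with Nat '/'.
def pvBounds (arr : List Int) (lo hi : Nat) : List Int :=
  if hi ≤ lo + 1 then []
  else
    pvBounds arr lo ((lo + hi) / 2) ++
    (if PySem.List.pyGetD arr (((lo + hi) / 2 : Nat) : Int) 0 ≠
        PySem.List.pyGetD arr ((((lo + hi) / 2 : Nat) : Int) - 1) 0
      then [(((lo + hi) / 2 : Nat) : Int)] else []) ++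
    pvBounds arr ((lo + hi) / 2) hi
termination_by hi - lo
decreasing_by all_goals omega

def get_unique_indices_alt (arr : List Int) : List Int :=
  [0] ++ pvBounds arr 0 arr.length

-- ===== PRECONDITION & SPEC =====
def Spec_get_unique_indices (arr : List Int) (out : List Int) : Prop := out = get_unique_indices_alt arr
instance (arr : List Int) (out : List Int) : Decidable (Spec_get_unique_indices arr out) := by unfold Spec_get_unique_indices; infer_instance

-- ===== CLAIM (what is proved, stated in full; the proofs are below) =====
def Claim_equal_get_unique_indices : Prop := ∀ (arr : List Int), Dom_get_unique_indices arr → Spec_get_unique_indices arr (get_unique_indices arr)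

-- ===== LEMMAS AND PROOFS =====

-- common characterization: pvSpecF arr k m lists i for i in [k, k+m) with arr[i] ≠ arr[i-1]
def pvSpecF (arr : List Int) : Nat → Nat → List Int
  | _, 0 => []
  | k, m + 1 =>
      (if PySem.List.pyGetD arr (k : Int) 0 ≠ PySem.List.pyGetD arr ((k : Int) - 1) 0
        then [(k : Int)] else []) ++ pvSpecF arr (k + 1) m

theorem pvSpecF_split (arr : List Int) (m1 : Nat) : ∀ (k m2 : Nat),
    pvSpecF arr k (m1 + m2) = pvSpecF arr k m1 ++ pvSpecF arr (k + m1) m2 := by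
  induction m1 with
  | zero => intro k m2; simp [pvSpecF]
  | succ m ih =>
      intro k m2
      have h : m + 1 + m2 = (m + m2) + 1 := by omega
      have hc : k + 1 + m = k + (m + 1) := by omega
      rw [h]
      simp only [pvSpecF, ih (k + 1) m2, hc, List.append_assoc]

-- boundary indices as emitted by A's loop: pvBndFrom p k ys lists k + j for (p :: ys)[j] ≠ (p :: ys)[j+1]
def pvBndFrom (p k : Int) : List Int → List Int
  | [] => []
  | y :: ys => (if y ≠ p then [k] else []) ++ pvBndFrom y (k + 1) ys

theorem pvA_loop (ys : List Int) : ∀ (pre : List Int) (p : Int) (acc : List Int),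
    ((PySem.List.pyRange ((pre.length : Int) + 1) (((pre ++ p :: ys).length : Int)) 1).foldl
      (fun (st : List Int × Int) i =>
        if PySem.List.pyGetD (pre ++ p :: ys) (st.2 - 1) 0 ≠ PySem.List.pyGetD (pre ++ p :: ys) i 0 then
          (st.1 ++ [i], st.2 + 1)
        else
          (st.1, i + 1))
      (acc, (pre.length : Int) + 1)).1
    = acc ++ pvBndFrom p ((pre.length : Int) + 1) ys := by
  induction ys with
  | nil =>
      intro pre p acc
      rw [PySem.List.pyRange_one_eq_nil (by simp)]
      simp [pvBndFrom]
  | cons y ys ih =>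
      intro pre p acc
      rw [PySem.List.pyRange_one_cons (by simp only [List.length_append, List.length_cons]; push_cast; omega)]
      have hIH := ih (pre ++ [p]) y
      simp only [List.append_assoc, List.cons_append, List.nil_append,
        List.length_append, List.length_cons] at hIH ⊢
      have h1 : PySem.List.pyGetD (pre ++ p :: y :: ys) ((pre.length : Int) + 1 - 1) 0 = p := by
        have h : (pre.length : Int) + 1 - 1 = (pre.length : Int) := by ring
        rw [h, PySem.List.pyGetD_natCast]
        simp [List.getD]
      have h2 : PySem.List.pyGetD (pre ++ p :: y :: ys) ((pre.length : Int) + 1) 0 = y := by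
        have h : (pre.length : Int) + 1 = ((pre.length + 1 : Nat) : Int) := by push_cast; ring
        rw [h, PySem.List.pyGetD_natCast]
        simp [List.getD]
      push_cast at hIH
      simp only [List.foldl_cons, h1, h2]
      by_cases hpy : p = y
      · subst hpy
        rw [if_neg (by simp)]
        simp only [pvBndFrom, ne_eq, not_true_eq_false, ite_false, List.nil_append]
        simpa using hIH acc
      · have := hIH (acc ++ [(pre.length : Int) + 1])
        rw [if_pos (by exact hpy)]
        simp only [pvBndFrom, if_pos (Ne.symm hpy)]
        simpa [List.append_assoc] using this

-- A's boundary list coincides with the spec segment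
theorem pvBndFrom_eq_specF (ys : List Int) : ∀ (pre : List Int) (p : Int),
    pvBndFrom p ((pre.length : Int) + 1) ys = pvSpecF (pre ++ p :: ys) (pre.length + 1) ys.length := by
  induction ys with
  | nil => intro pre p; simp [pvBndFrom, pvSpecF]
  | cons y ys ih =>
      intro pre p
      have h1 : PySem.List.pyGetD (pre ++ p :: y :: ys) (((pre.length + 1 : Nat) : Int)) 0 = y := by
        rw [PySem.List.pyGetD_natCast]; simp [List.getD]
      have h2 : PySem.List.pyGetD (pre ++ p :: y :: ys) (((pre.length + 1 : Nat) : Int) - 1) 0 = p := by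
        have h : ((pre.length + 1 : Nat) : Int) - 1 = ((pre.length : Nat) : Int) := by push_cast; ring
        rw [h, PySem.List.pyGetD_natCast]; simp [List.getD]
      have hIH := ih (pre ++ [p]) y
      simp only [List.append_assoc, List.cons_append, List.nil_append,
        List.length_append, List.length_cons] at hIH
      simp only [pvBndFrom, List.length_cons, pvSpecF, h1, h2]
      push_cast
      congr 1

-- B's divide-and-conquer coincides with the spec segment
theorem pvBounds_eq_specF (arr : List Int) (n : Nat) : ∀ (lo hi : Nat), hi - lo ≤ n →
    pvBounds arr lo hi = pvSpecF arr (lo + 1) (hi - lo - 1) := by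
  induction n with
  | zero =>
      intro lo hi h
      rw [pvBounds]
      rw [if_pos (by omega)]
      have : hi - lo - 1 = 0 := by omega
      rw [this]; rfl
  | succ n ih =>
      intro lo hi h
      rw [pvBounds]
      by_cases hle : hi ≤ lo + 1
      · rw [if_pos hle]
        have : hi - lo - 1 = 0 := by omega
        rw [this]; rfl
      · rw [if_neg hle]
        have hmidlo : lo < (lo + hi) / 2 := by omega
        have hmidhi : (lo + hi) / 2 < hi := by omega
        rw [ih lo ((lo + hi) / 2) (by omega), ih ((lo + hi) / 2) hi (by omega)]
        have hsplit : hi - lo - 1 = ((lo + hi) / 2 - lo - 1) + ((hi - (lo + hi) / 2 - 1) + 1) := by omega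
        rw [hsplit, pvSpecF_split]
        have hk : lo + 1 + ((lo + hi) / 2 - lo - 1) = (lo + hi) / 2 := by omega
        rw [hk]
        simp only [pvSpecF, List.append_assoc]

theorem get_unique_indices_spec : Claim_equal_get_unique_indices := by
  unfold Claim_equal_get_unique_indices Spec_get_unique_indices
  intro arr _
  cases arr with
  | nil =>
      unfold get_unique_indices get_unique_indices_alt
      rw [PySem.List.pyRange_one_eq_nil (by norm_num), pvBounds]
      simp
  | cons x xs =>
      unfold get_unique_indices get_unique_indices_alt
      have hA := pvA_loop xs [] x [0]
      simp only [List.nil_append, List.length_nil, Nat.cast_zero, zero_add] at hA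
      have hS := pvBndFrom_eq_specF xs [] x
      simp only [List.length_nil, Nat.cast_zero, zero_add, List.nil_append] at hS
      have hB := pvBounds_eq_specF (x :: xs) (x :: xs).length 0 (x :: xs).length (by omega)
      simp only [List.length_cons, Nat.zero_add, Nat.sub_zero, Nat.add_sub_cancel] at hB
      refine hA.trans ?_
      simp only [List.length_cons]
      rw [hS, hB]
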